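-- pv_equiv track=rewrite | github.com/rnaimehaom/rxn_yield_context | rxn_yield_context/evaluate_model/evaluate_with_dummy.py | compare_answer_and_combinations
-- ===== SOURCE A (Python) =====
-- def compare_answer_and_combinations(answers, context_combinations):
--     for answer in answers:
--         answer_s, answer_r = answer
--         for i, context in enumerate(context_combinations):
--             solvent, reagent = context
--             solvent = set(solvent.split('; '))
--             reagent = set(reagent.split('; '))
--             if (answer_s == solvent) & (answer_r == reagent):
--                 return i
--     return None
-- ===== SOURCE B (Python) =====
-- def compare_answer_and_combinations(answers, context_combinations):
--     # Build an index once: frozenset key of each context -> its first (minimal) index,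
--     # then answer each query with a single O(1) lookup.
--     index = {}
--     for i, (solvent, reagent) in enumerate(context_combinations):
--         key = (frozenset(solvent.split('; ')), frozenset(reagent.split('; ')))
--         if key not in index:
--             index[key] = i
--     for answer_s, answer_r in answers:
--         hit = index.get((frozenset(answer_s), frozenset(answer_r)))
--         if hit is not None:
--             return hit
--     return None
-- ===== Notes on version B (the rewrite author's own statement) =====
-- stated objective: faster
-- what changed: Instead of rescanning and re-splitting every context for each answer, B splits each context once into a dict keyed by (frozenset(solvents), frozenset(reagents)) mapping to the first index, then answers each query with one hash lookup.
import Mathlib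
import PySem

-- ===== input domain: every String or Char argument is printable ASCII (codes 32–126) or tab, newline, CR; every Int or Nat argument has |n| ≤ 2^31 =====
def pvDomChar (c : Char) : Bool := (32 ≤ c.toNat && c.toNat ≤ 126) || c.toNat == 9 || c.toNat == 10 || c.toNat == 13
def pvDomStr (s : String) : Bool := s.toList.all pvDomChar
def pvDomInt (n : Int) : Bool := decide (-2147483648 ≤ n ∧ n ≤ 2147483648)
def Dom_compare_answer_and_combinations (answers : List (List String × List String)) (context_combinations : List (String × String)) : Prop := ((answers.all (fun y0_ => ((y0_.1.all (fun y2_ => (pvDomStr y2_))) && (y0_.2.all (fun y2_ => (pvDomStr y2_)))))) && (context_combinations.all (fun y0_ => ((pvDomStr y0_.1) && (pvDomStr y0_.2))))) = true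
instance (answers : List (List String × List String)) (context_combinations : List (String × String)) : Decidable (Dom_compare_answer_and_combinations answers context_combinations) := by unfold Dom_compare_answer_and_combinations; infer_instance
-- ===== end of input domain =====

-- B replaces A's rescan of all contexts per answer by a dict (context key -> first index) built once; proved here: identical return value.

-- ===== PORT A =====
-- s.split('; '): sep is the nonempty literal '; ', so PySem.Str.split? is always some; .getD [] is never taken
def caacSplit (s : String) : List String := (PySem.Str.split? s "; ").getD []

-- inner 'for i, context in enumerate(context_combinations)' loop of A
def caacInnerA (answer_s answer_r : List String) : List (String × String) → Int → Option Int
  | [], _ => none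
  | (solvent, reagent) :: rest, i =>
    if PySem.Set.equal answer_s (PySem.Set.ofList (caacSplit solvent)) &&
       PySem.Set.equal answer_r (PySem.Set.ofList (caacSplit reagent)) then
      some i
    else
      caacInnerA answer_s answer_r rest (i + 1)

def compare_answer_and_combinations (answers : List (List String × List String)) (context_combinations : List (String × String)) : Option Int :=
  match answers with
  | [] => none
  | (answer_s, answer_r) :: rest =>
    match caacInnerA answer_s answer_r context_combinations 0 with
    | some i => some i
    | none => compare_answer_and_combinations rest context_combinations

-- ===== PORT B =====
-- canonical representation of a frozenset of strings (frozensets are equal iff canon keys are)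
def caacCanon (xs : List String) : List String :=
  PySem.List.sorted (PySem.Set.ofList xs) (fun x => x) false

-- first loop of B: build the index dict (first index wins)
def caacBuild : List (String × String) → Int → PySem.Dict (List String × List String) Int → PySem.Dict (List String × List String) Int
  | [], _, d => d
  | (solvent, reagent) :: rest, i, d =>
    let k := (caacCanon (caacSplit solvent), caacCanon (caacSplit reagent))
    caacBuild rest (i + 1) (if d.contains k then d else d.insert k i)

-- second loop of B: one lookup per answer
def caacLookup (d : PySem.Dict (List String × List String) Int) : List (List String × List String) → Option Int
  | [] => none
  | (answer_s, answer_r) :: rest =>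
    match d.get? (caacCanon answer_s, caacCanon answer_r) with
    | some hit => some hit
    | none => caacLookup d rest

def compare_answer_and_combinations_alt (answers : List (List String × List String)) (context_combinations : List (String × String)) : Option Int :=
  caacLookup (caacBuild context_combinations 0 PySem.Dict.empty) answers

-- ===== PRECONDITION & SPEC =====
def Spec_compare_answer_and_combinations (answers : List (List String × List String)) (context_combinations : List (String × String)) (out : Option Int) : Prop := out = compare_answer_and_combinations_alt answers context_combinations
instance (answers : List (List String × List String)) (context_combinations : List (String × String)) (out : Option Int) : Decidable (Spec_compare_answer_and_combinations answers context_combinations out) := by unfold Spec_compare_answer_and_combinations; infer_instance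

-- ===== CLAIM (what is proved, stated in full; the proofs are below) =====
def Claim_equal_compare_answer_and_combinations : Prop := ∀ (answers : List (List String × List String)) (context_combinations : List (String × String)), Dom_compare_answer_and_combinations answers context_combinations → Spec_compare_answer_and_combinations answers context_combinations (compare_answer_and_combinations answers context_combinations)

-- ===== LEMMAS AND PROOFS =====

-- set equality of the underlying sets ↔ equality of canonical keys
theorem caac_equal_iff_canon (xs ys : List String) :
    PySem.Set.equal xs (PySem.Set.ofList ys) = true ↔ caacCanon xs = caacCanon ys := by
  rw [PySem.Set.equal_iff, caacCanon, caacCanon, PySem.List.sorted_id_eq_sorted_id_iff_perm,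
    List.perm_ext_iff_of_nodup (PySem.Set.nodup_ofList xs) (PySem.Set.nodup_ofList ys)]
  constructor
  · intro h x; rw [PySem.Set.mem_ofList, PySem.Set.mem_ofList, ← PySem.Set.mem_ofList (xs := ys)]; exact h x
  · intro h x; rw [PySem.Set.mem_ofList (xs := ys), ← PySem.Set.mem_ofList (xs := xs),
      ← PySem.Set.mem_ofList (xs := ys)]; exact h x

-- one answer's lookup in the built dict is exactly A's inner scan
theorem caac_build_get (s r : List String) :
    ∀ (ctx : List (String × String)) (i : Int) (d : PySem.Dict (List String × List String) Int),
      (caacBuild ctx i d).get? (caacCanon s, caacCanon r) =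
        match d.get? (caacCanon s, caacCanon r) with
        | some v => some v
        | none => caacInnerA s r ctx i := by
  intro ctx
  induction ctx with
  | nil => intro i d; cases h : d.get? (caacCanon s, caacCanon r) <;> simp [caacBuild, caacInnerA, h]
  | cons c rest ih =>
    intro i d
    obtain ⟨solvent, reagent⟩ := c
    simp only [caacBuild, caacInnerA]
    set k0 : List String × List String :=
      (caacCanon (caacSplit solvent), caacCanon (caacSplit reagent)) with hk0
    by_cases hmatch :
        PySem.Set.equal s (PySem.Set.ofList (caacSplit solvent)) = true ∧
        PySem.Set.equal r (PySem.Set.ofList (caacSplit reagent)) = true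
    · have hkey : (caacCanon s, caacCanon r) = k0 := by
        rw [hk0]
        exact Prod.ext ((caac_equal_iff_canon _ _).mp hmatch.1) ((caac_equal_iff_canon _ _).mp hmatch.2)
      rw [ih, hkey]
      by_cases hc : d.contains k0 = true
      · simp only [hc, if_true]
        have := PySem.Dict.contains_eq_isSome_get? (d := d) (k := k0)
        rw [hc] at this
        obtain ⟨v, hv⟩ := Option.isSome_iff_exists.mp this.symm
        rw [hv]
      · simp only [hc]
        have hnone : d.get? k0 = none := by
          have := PySem.Dict.contains_eq_isSome_get? (d := d) (k := k0)
          rw [eq_false_of_ne_true hc] at this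
          cases hg : d.get? k0 with
          | none => rfl
          | some v => rw [hg] at this; simp at this
        simp only [Bool.false_eq_true, if_false, PySem.Dict.get?_insert_self,
          hmatch.1, hmatch.2, Bool.and_self, if_true]
        rw [hnone]
    · have hkey : (caacCanon s, caacCanon r) ≠ k0 := by
        intro h
        apply hmatch
        rw [hk0] at h
        have h1 := congrArg Prod.fst h
        have h2 := congrArg Prod.snd h
        exact ⟨(caac_equal_iff_canon _ _).mpr h1, (caac_equal_iff_canon _ _).mpr h2⟩
      have hcond : (PySem.Set.equal s (PySem.Set.ofList (caacSplit solvent)) &&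
          PySem.Set.equal r (PySem.Set.ofList (caacSplit reagent))) = false := by
        rcases Decidable.not_and_iff_not_or_not.mp hmatch with h | h <;>
          simp [eq_false_of_ne_true h]
      rw [ih]
      by_cases hc : d.contains k0 = true
      · simp only [hc, if_true, hcond, Bool.false_eq_true, if_false]
      · simp only [hc, if_false, PySem.Dict.get?_insert_of_ne d i hkey, hcond,
          Bool.false_eq_true]

-- ===== VERDICT (by name: the statement is the Claim_ definition above) =====
theorem compare_answer_and_combinations_spec : Claim_equal_compare_answer_and_combinations := by
  intro answers ctx hd
  clear hd
  unfold Spec_compare_answer_and_combinations compare_answer_and_combinations_alt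
  induction answers with
  | nil => simp [compare_answer_and_combinations, caacLookup]
  | cons a rest ih =>
    obtain ⟨s, r⟩ := a
    simp only [compare_answer_and_combinations, caacLookup]
    rw [caac_build_get s r ctx 0 PySem.Dict.empty, PySem.Dict.get?_empty]
    cases h : caacInnerA s r ctx 0 with
    | none => simpa [h] using ih
    | some i => simp
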